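-- pv_equiv track=rewrite | github.com/lynl7130/CuGdet | db/utils.py | tables_to_sql
-- ===== SOURCE A (Python) =====
-- def tables_to_sql(tables):
--     res = []
--     i = 1
--     for join_type in tables:
--         tmp = []
--         for table in tables[join_type]:
--             tmp.append("%s as T%s" % (table, str(i)))
--             i += 1
--         tmp_s = " %s " % join_type
--         res.append(tmp_s.join(tmp))
--     res = ", ".join(res)
--     return res
-- ===== SOURCE B (Python) =====
-- def tables_to_sql(tables):
--     groups = list(tables.items())
--     sizes = [len(v) for _, v in groups]
--     offsets = [1 + sum(sizes[:g]) for g in range(len(groups))]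
--     parts = [(" %s " % jt).join("%s as T%d" % (t, off + k) for k, t in enumerate(v))
--              for (jt, v), off in zip(groups, offsets)]
--     return ", ".join(parts)
-- ===== Notes on version B (the rewrite author's own statement) =====
-- stated objective: alternative
-- what changed: Replaces the single mutable alias counter threaded through nested loops by a prefix-sum of group sizes computed up front, then builds each group's string independently with enumerate at its precomputed offset.
import Mathlib
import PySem

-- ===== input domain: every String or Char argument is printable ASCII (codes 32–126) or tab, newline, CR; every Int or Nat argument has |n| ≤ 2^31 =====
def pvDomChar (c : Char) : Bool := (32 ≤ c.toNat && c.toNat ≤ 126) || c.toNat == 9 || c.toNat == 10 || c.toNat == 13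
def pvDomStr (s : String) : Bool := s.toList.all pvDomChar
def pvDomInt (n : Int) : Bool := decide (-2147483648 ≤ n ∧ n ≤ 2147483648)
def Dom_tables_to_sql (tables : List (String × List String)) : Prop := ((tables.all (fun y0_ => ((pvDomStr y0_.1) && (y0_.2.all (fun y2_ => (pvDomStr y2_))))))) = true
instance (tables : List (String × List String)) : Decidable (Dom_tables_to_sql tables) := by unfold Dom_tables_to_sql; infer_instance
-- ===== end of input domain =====

-- B separates alias numbering (prefix-sums of group sizes) from string building; alternative decomposition, not faster.

-- ===== PORT A =====
-- literal port: a single counter i threaded through nested loops; iterating the dict's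
-- keys and looking each key up (tables[join_type]) exactly as the Python does
def tables_to_sql (tables : List (String × List String)) : String :=
  let r := (tables.map Prod.fst).foldl
    (fun (st : List String × Int) (join_type : String) =>
      let inner := (PySem.Dict.getD (PySem.Dict.mk tables) join_type []).foldl
        (fun (t : List String × Int) (table : String) =>
          (t.1 ++ [table ++ " as T" ++ PySem.Int.toStr t.2], t.2 + 1)) ([], st.2)
      (st.1 ++ [PySem.Str.join (" " ++ join_type ++ " ") inner.1], inner.2))
    ([], (1 : Int))
  PySem.Str.join ", " r.1

-- ===== PORT B =====
def tables_to_sql_alt (tables : List (String × List String)) : String :=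
  let sizes : List Int := tables.map (fun g => (g.2.length : Int))
  let offsets : List Int := (List.range tables.length).map (fun g => 1 + (sizes.take g).sum)
  let parts : List String := (tables.zip offsets).map
    (fun p => PySem.Str.join (" " ++ p.1.1 ++ " ")
      ((PySem.List.enumerate p.1.2).map (fun kt => kt.2 ++ " as T" ++ PySem.Int.toStr (p.2 + kt.1))))
  PySem.Str.join ", " parts

-- ===== PRECONDITION & SPEC =====
-- Pre_ excludes association lists with duplicate keys: A's argument is a Python dict,
-- whose keys are necessarily distinct, so such lists represent no real input.
def Pre_tables_to_sql (tables : List (String × List String)) : Prop :=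
  (tables.map Prod.fst).Nodup
instance (tables : List (String × List String)) : Decidable (Pre_tables_to_sql tables) := by
  unfold Pre_tables_to_sql; infer_instance
def pvWitness_tables_to_sql : (List (String × List String)) :=
  [("join", ["a", "b"]), ("left join", ["c"])]
def Spec_tables_to_sql (tables : List (String × List String)) (out : String) : Prop := out = tables_to_sql_alt tables
instance (tables : List (String × List String)) (out : String) : Decidable (Spec_tables_to_sql tables out) := by unfold Spec_tables_to_sql; infer_instance

-- ===== CLAIM (what is proved, stated in full; the proofs are below) =====
def Claim_equal_tables_to_sql : Prop := ∀ (tables : List (String × List String)), Dom_tables_to_sql tables → Pre_tables_to_sql tables → Spec_tables_to_sql tables (tables_to_sql tables)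

-- ===== LEMMAS AND PROOFS =====

-- formatted aliases of a group's tables, numbered from i
def pvFmt : List String → Int → List String
  | [], _ => []
  | t :: ts, i => (t ++ " as T" ++ PySem.Int.toStr i) :: pvFmt ts (i + 1)

-- per-group strings, numbering starting at i
def pvParts : List (String × List String) → Int → List String
  | [], _ => []
  | (jt, v) :: ts, i => PySem.Str.join (" " ++ jt ++ " ") (pvFmt v i) :: pvParts ts (i + v.length)

theorem pvFmt_eq_enum (v : List String) (s i : Int) :
    (PySem.List.enumerate v s).map (fun kt => kt.2 ++ " as T" ++ PySem.Int.toStr (i + kt.1))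
      = pvFmt v (i + s) := by
  induction v generalizing s i with
  | nil => simp [PySem.List.enumerate_nil, pvFmt]
  | cons h t ih =>
    rw [PySem.List.enumerate_cons]
    simp only [List.map_cons, pvFmt]
    rw [ih]
    ring_nf

theorem pvInner_eq (v : List String) (acc : List String) (i : Int) :
    v.foldl (fun (t : List String × Int) (table : String) =>
        (t.1 ++ [table ++ " as T" ++ PySem.Int.toStr t.2], t.2 + 1)) (acc, i)
      = (acc ++ pvFmt v i, i + v.length) := by
  induction v generalizing acc i with
  | nil => simp [pvFmt]
  | cons h t ih =>
    simp only [List.foldl_cons, ih]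
    rw [Prod.mk.injEq]
    refine ⟨by simp [pvFmt], by push_cast [List.length_cons]; ring⟩

theorem pvA_fold (tables ts : List (String × List String)) (acc : List String) (i : Int)
    (hl : ∀ p ∈ ts, PySem.Dict.getD (PySem.Dict.mk tables) p.1 [] = p.2) :
    ts.foldl (fun (st : List String × Int) (p : String × List String) =>
        let inner := (PySem.Dict.getD (PySem.Dict.mk tables) p.1 []).foldl
          (fun (t : List String × Int) (table : String) =>
            (t.1 ++ [table ++ " as T" ++ PySem.Int.toStr t.2], t.2 + 1)) ([], st.2)
        (st.1 ++ [PySem.Str.join (" " ++ p.1 ++ " ") inner.1], inner.2)) (acc, i)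
      = (acc ++ pvParts ts i, i + ((ts.map (fun p => (p.2.length : Int))).sum)) := by
  induction ts generalizing acc i with
  | nil => simp [pvParts]
  | cons p t ih =>
    obtain ⟨jt, v⟩ := p
    have hv : PySem.Dict.getD (PySem.Dict.mk tables) jt [] = v := hl (jt, v) (by simp)
    simp only [List.foldl_cons, hv]
    rw [pvInner_eq]
    simp only [List.nil_append]
    rw [ih _ _ (fun q hq => hl q (List.mem_cons_of_mem _ hq))]
    simp [pvParts, add_assoc]

theorem pvB_zip (ts : List (String × List String)) (i : Int) :
    (ts.zip ((List.range ts.length).map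
        (fun g => i + ((ts.map (fun g => (g.2.length : Int))).take g).sum))).map
      (fun p => PySem.Str.join (" " ++ p.1.1 ++ " ")
        ((PySem.List.enumerate p.1.2).map (fun kt => kt.2 ++ " as T" ++ PySem.Int.toStr (p.2 + kt.1))))
      = pvParts ts i := by
  induction ts generalizing i with
  | nil => simp [pvParts]
  | cons p t ih =>
    obtain ⟨jt, v⟩ := p
    rw [List.length_cons, List.range_succ_eq_map]
    simp only [List.map_cons, List.map_map, List.zip_cons_cons, List.take_zero,
      List.sum_nil, add_zero, List.map_cons]
    have hfn : ((fun g => i + (((v.length : Int) :: t.map (fun g => (g.2.length : Int))).take g).sum) ∘ Nat.succ)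
        = (fun g => (i + v.length) + ((t.map (fun g => (g.2.length : Int))).take g).sum) := by
      funext g
      simp [List.take_succ_cons, add_assoc]
    rw [hfn, ih]
    have hh : (PySem.List.enumerate v).map
        (fun kt => kt.2 ++ " as T" ++ PySem.Int.toStr (i + kt.1)) = pvFmt v i := by
      have := pvFmt_eq_enum v 0 i
      simpa using this
    simp [pvParts, hh]

theorem pv_lookup (tables : List (String × List String)) (h : (tables.map Prod.fst).Nodup)
    (p : String × List String) (hp : p ∈ tables) :
    PySem.Dict.getD (PySem.Dict.mk tables) p.1 [] = p.2 := by
  apply PySem.Dict.getD_of_mem_items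
  · exact hp
  · exact h

-- ===== VERDICT (by name: the statement is the Claim_ definition above) =====
theorem tables_to_sql_spec : Claim_equal_tables_to_sql := by
  intro tables _ hpre
  unfold Spec_tables_to_sql tables_to_sql tables_to_sql_alt
  rw [List.foldl_map]
  rw [pvA_fold tables tables [] 1 (fun p hp => pv_lookup tables hpre p hp)]
  simp only [pvB_zip tables 1]
  simp
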